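-- pv_equiv track=rewrite | github.com/shake54/segmentation-kit | my_func2.py | list_duplicates
-- ===== SOURCE A (Python) =====
-- def list_duplicates(input_list):
--   once = set()
--   seenOnce = once.add
--   twice = list(set( num for num in input_list if num in once or seenOnce(num) ))
--   for val in twice:
--       duplicate_num = [i for i, _x in enumerate(input_list) if _x == val]
--       for cnt,index in enumerate(duplicate_num):
--           input_list[index] = input_list[index]+"_{}".format(cnt+1)
--
--   return input_list
-- ===== SOURCE B (Python) =====
-- def list_duplicates(input_list):
--   total = {}
--   for v in input_list:
--     total[v] = total.get(v, 0) + 1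
--   seen = {}
--   for i, v in enumerate(input_list):
--     if total[v] > 1:
--       c = seen.get(v, 0) + 1
--       seen[v] = c
--       input_list[i] = v + "_{}".format(c)
--   return input_list
-- ===== Notes on version B (the rewrite author's own statement) =====
-- stated objective: faster
-- what changed: A collects the duplicated values via a set comprehension and then, for each duplicated value, rescans the whole (mutated) list for its indices; B makes one counting pass building a value->count dict and then a single left-to-right pass that renames each occurrence of a duplicated value using a running per-value counter, mutating the list in place.
import Mathlib
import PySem

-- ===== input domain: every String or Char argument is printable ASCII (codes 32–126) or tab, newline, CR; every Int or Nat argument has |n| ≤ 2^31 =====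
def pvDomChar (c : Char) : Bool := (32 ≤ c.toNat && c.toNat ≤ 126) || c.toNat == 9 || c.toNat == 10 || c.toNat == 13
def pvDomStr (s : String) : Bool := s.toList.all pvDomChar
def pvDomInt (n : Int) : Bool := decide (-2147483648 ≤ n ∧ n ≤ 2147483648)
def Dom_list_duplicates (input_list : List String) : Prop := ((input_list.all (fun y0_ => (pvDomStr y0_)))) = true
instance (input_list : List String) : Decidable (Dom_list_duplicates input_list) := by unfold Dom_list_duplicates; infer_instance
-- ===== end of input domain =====

-- B replaces A's per-duplicated-value full rescans with one counting pass plus one renaming pass (objective: faster).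
-- Python A mutates input_list in place and returns it; B performs the same in-place mutation; the equivalence proved here is about the return value.

-- ===== PORT A =====
-- 'num in once or seenOnce(num)': a first occurrence is added to 'once' (add returns None, falsy), later occurrences are yielded
def pvDupOccs : List String → PySem.Set String → List String
  | [], _ => []
  | x :: xs, once =>
      if PySem.Set.contains once x then x :: pvDupOccs xs once
      else pvDupOccs xs (PySem.Set.add once x)

-- 'input_list[index] = input_list[index]+"_{}".format(cnt+1)'; index comes from enumerate, so it is ≥ 0 and .toNat is exact
def pvAInner (lst : List String) (ci : Int × Int) : List String :=
  lst.set ci.2.toNat (PySem.List.pyGetD lst ci.2 "" ++ "_" ++ PySem.Int.toStr (ci.1 + 1))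

-- one iteration of 'for val in twice'
def pvAStep (lst : List String) (val : String) : List String :=
  let duplicate_num : List Int :=
    ((PySem.List.enumerate lst).filter (fun p => p.2 == val)).map (fun p => p.1)
  (PySem.List.enumerate duplicate_num).foldl pvAInner lst

def list_duplicates (input_list : List String) : List String :=
  let twice : List String := PySem.Set.ofList (pvDupOccs input_list PySem.Set.empty)
  twice.foldl pvAStep input_list

-- ===== PORT B =====
-- one iteration of B's renaming loop; the pair iv comes from enumerate(input_list): the Python loop mutates only
-- index i at step i, so the value it observes at i is the original one (index i ≥ 0, .toNat exact)
def pvBStep (total : PySem.Dict String Int) (st : List String × PySem.Dict String Int)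
    (iv : Int × String) : List String × PySem.Dict String Int :=
  if PySem.Dict.getD total iv.2 0 > 1 then
    let c := PySem.Dict.getD st.2 iv.2 0 + 1
    (st.1.set iv.1.toNat (iv.2 ++ "_" ++ PySem.Int.toStr c), PySem.Dict.insert st.2 iv.2 c)
  else st

def list_duplicates_alt (input_list : List String) : List String :=
  let total : PySem.Dict String Int :=
    input_list.foldl (fun d v => PySem.Dict.insert d v (PySem.Dict.getD d v 0 + 1)) PySem.Dict.empty
  ((PySem.List.enumerate input_list).foldl (pvBStep total) (input_list, PySem.Dict.empty)).1

-- ===== PRECONDITION & SPEC =====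
-- Pre_ excludes lists in which some duplicated value equals another duplicated value followed by one of the suffixes
-- "_1".."_count" the loop appends: there A's later rescans pick up freshly renamed entries, so A's result depends on
-- the hash-seed-dependent iteration order of 'list(set(...))' — a defensible-corner artefact of A's implementation.
def Pre_list_duplicates (input_list : List String) : Prop :=
  ∀ v ∈ input_list, 2 ≤ input_list.count v → ∀ w ∈ input_list, 2 ≤ input_list.count w →
    ∀ k ∈ List.range (input_list.count v), w ≠ v ++ "_" ++ PySem.Int.toStr ((k : Int) + 1)

-- convenient form of Pre_
instance (input_list : List String) : Decidable (Pre_list_duplicates input_list) := by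
  unfold Pre_list_duplicates; infer_instance

def pvWitness_list_duplicates : List String := ["a", "b", "a", "c", "b"]

def Spec_list_duplicates (input_list : List String) (out : List String) : Prop := out = list_duplicates_alt input_list
instance (input_list : List String) (out : List String) : Decidable (Spec_list_duplicates input_list out) := by unfold Spec_list_duplicates; infer_instance

-- ===== CLAIM (what is proved, stated in full; the proofs are below) =====
def Claim_equal_list_duplicates : Prop := ∀ (input_list : List String), Dom_list_duplicates input_list → Pre_list_duplicates input_list → Spec_list_duplicates input_list (list_duplicates input_list)

-- ===== LEMMAS AND PROOFS =====
-- Both ports are shown to compute pvRes: the list in which each occurrence of a duplicated value v is renamed to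
-- v ++ "_" ++ str(rank of the occurrence among the occurrences of v), everything else untouched.

def pvFval (l : List String) (j : Nat) : String :=
  l.getD j "" ++ "_" ++ PySem.Int.toStr (((l.take (j + 1)).count (l.getD j "") : Nat) : Int)

def pvRes (l : List String) : List String :=
  (List.range l.length).map (fun j => if 2 ≤ l.count (l.getD j "") then pvFval l j else l.getD j "")

-- partial rename: positions below m whose value is duplicated are renamed, the rest original

theorem mem_pvDupOccs (l : List String) (once : PySem.Set String) (v : String) :
    v ∈ pvDupOccs l once ↔
      (PySem.Set.contains once v = true ∧ 1 ≤ l.count v) ∨ 2 ≤ l.count v := by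
  induction l generalizing once with
  | nil => simp [pvDupOccs]
  | cons x xs ih =>
    simp only [pvDupOccs]
    by_cases hv : v = x
    · subst hv
      by_cases hx : PySem.Set.contains once v = true
      · rw [if_pos hx]
        simp only [List.mem_cons, List.count_cons_self]
        constructor
        · intro _; exact Or.inl ⟨hx, by omega⟩
        · intro _; simp
      · rw [if_neg hx]
        rw [ih]
        have hadd : PySem.Set.contains (PySem.Set.add once v) v = true :=
          (PySem.Set.contains_iff _ _).2 ((PySem.Set.mem_add _ _ _).2 (Or.inr rfl))
        have hx' : PySem.Set.contains once v = false := by simpa using hx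
        rw [hadd, hx']
        simp only [List.count_cons_self]
        constructor
        · rintro (⟨_, h⟩ | h) <;> exact Or.inr (by omega)
        · rintro (⟨hf, _⟩ | h)
          · exact absurd hf (by simp)
          · exact Or.inl ⟨trivial, by omega⟩
    · have hcount : (x :: xs).count v = xs.count v := by simp [Ne.symm hv]
      by_cases hx : PySem.Set.contains once x = true
      · rw [if_pos hx]
        simp only [List.mem_cons, hv, false_or, ih, hcount]
      · rw [if_neg hx, ih, hcount]
        have hc : PySem.Set.contains (PySem.Set.add once x) v = PySem.Set.contains once v := by
          by_cases hm : v ∈ once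
          · rw [(PySem.Set.contains_iff _ _).2 hm,
              (PySem.Set.contains_iff _ _).2 ((PySem.Set.mem_add _ _ _).2 (Or.inl hm))]
          · have h1 : PySem.Set.contains once v = false := by
              rw [Bool.eq_false_iff]; exact fun hy => hm ((PySem.Set.contains_iff _ _).1 hy)
            have h2 : PySem.Set.contains (PySem.Set.add once x) v = false := by
              rw [Bool.eq_false_iff]; intro hy
              rcases (PySem.Set.mem_add _ _ _).1 ((PySem.Set.contains_iff _ _).1 hy) with hm' | hm'
              · exact hm hm'
              · exact hv hm'
            rw [h1, h2]
        rw [hc]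

theorem count_take_succ (l : List String) (m : Nat) (v : String) (hm : m < l.length) :
    (l.take (m + 1)).count v = (l.take m).count v + (if l.getD m "" = v then 1 else 0) := by
  rw [List.take_add_one, List.count_append]
  congr 1
  rw [List.getElem?_eq_getElem hm]
  by_cases h : l.getD m "" = v
  · rw [if_pos h]
    rw [List.getD_eq_getElem?_getD, List.getElem?_eq_getElem hm] at h
    simp only [Option.getD_some] at h
    simp [h]
  · rw [if_neg h]
    rw [List.getD_eq_getElem?_getD, List.getElem?_eq_getElem hm] at h
    simp only [Option.getD_some] at h
    simp [h]

def pvMixed (l : List String) (S : List String) : List String :=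
  (List.range l.length).map (fun j => if l.getD j "" ∈ S then pvFval l j else l.getD j "")

theorem pvMixed_nil (l : List String) : pvMixed l [] = l := by
  apply List.ext_getElem
  · simp [pvMixed]
  · intro i h1 h2
    simp [pvMixed, List.getD_eq_getElem?_getD, List.getElem?_eq_getElem h2]

def pvPartial (l : List String) (m : Nat) : List String :=
  (List.range l.length).map (fun j => if j < m ∧ 2 ≤ l.count (l.getD j "") then pvFval l j else l.getD j "")

theorem pvPartial_length (l : List String) (m : Nat) : (pvPartial l m).length = l.length := by
  simp [pvPartial]

theorem pvPartial_zero (l : List String) : pvPartial l 0 = l := by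
  apply List.ext_getElem
  · simp [pvPartial]
  · intro i h1 h2
    simp [pvPartial, List.getD_eq_getElem?_getD, List.getElem?_eq_getElem h2]

theorem pvPartial_full (l : List String) : pvPartial l l.length = pvRes l := by
  apply List.ext_getElem
  · simp [pvPartial, pvRes]
  · intro i h1 h2
    simp only [pvPartial, pvRes, List.getElem_map, List.getElem_range] at *
    congr 1
    simp [pvPartial_length] at h1
    simp [h1]

theorem pvPartial_set (l : List String) (m : Nat)
    (hdup : 2 ≤ l.count (l.getD m "")) :
    (pvPartial l m).set m (pvFval l m) = pvPartial l (m + 1) := by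
  apply List.ext_getElem
  · simp [pvPartial]
  · intro i h1 h2
    rw [List.getElem_set]
    by_cases hi : m = i
    · subst hi
      rw [if_pos rfl]
      simp only [pvPartial, List.getElem_map, List.getElem_range]
      rw [if_pos ⟨by omega, hdup⟩]
    · rw [if_neg hi]
      simp only [pvPartial, List.getElem_map, List.getElem_range] at *
      by_cases hc : i < m ∧ 2 ≤ l.count (l.getD i "")
      · rw [if_pos hc, if_pos ⟨by omega, hc.2⟩]
      · rw [if_neg hc, if_neg (by intro ⟨ha, hb⟩; exact hc ⟨by omega, hb⟩)]

theorem pvPartial_succ_nondup (l : List String) (m : Nat)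
    (h : ¬ 2 ≤ l.count (l.getD m "")) :
    pvPartial l (m + 1) = pvPartial l m := by
  apply List.ext_getElem
  · simp [pvPartial]
  · intro i h1 h2
    simp only [pvPartial, List.getElem_map, List.getElem_range] at *
    by_cases hc : i < m ∧ 2 ≤ l.count (l.getD i "")
    · rw [if_pos ⟨by omega, hc.2⟩, if_pos hc]
    · have hn : ¬ (i < m + 1 ∧ 2 ≤ l.count (l.getD i "")) := by
        rintro ⟨ha, hb⟩
        rcases Nat.lt_or_ge i m with h' | h'
        · exact hc ⟨h', hb⟩
        · have him : i = m := by omega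
          rw [him] at hb
          exact h hb
      rw [if_neg hn, if_neg hc]

theorem pvB_fold (l : List String) (total : PySem.Dict String Int)
    (htotal : ∀ v, total.getD v 0 = (l.count v : Int))
    (suffix : List String) (m : Nat) (hsuffix : suffix = l.drop m) (hm : m ≤ l.length)
    (seen : PySem.Dict String Int)
    (hseen : ∀ v, 2 ≤ l.count v → seen.getD v 0 = ((l.take m).count v : Int)) :
    ((PySem.List.enumerate suffix (m : Int)).foldl (pvBStep total) (pvPartial l m, seen)).1
      = pvRes l := by
  induction suffix generalizing m seen with
  | nil =>
    have : m = l.length := by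
      have := congrArg List.length hsuffix
      simp [List.length_drop] at this
      omega
    subst this
    simp [pvPartial_full]
  | cons v rest ih =>
    have hmlt : m < l.length := by
      by_contra h
      rw [List.drop_eq_nil_of_le (by omega)] at hsuffix
      simp at hsuffix
    have hv : l.getD m "" = v := by
      have h0 : (List.drop m l)[0]? = l[m + 0]? := List.getElem?_drop
      rw [← hsuffix] at h0
      simp only [Nat.add_zero] at h0
      rw [List.getD_eq_getElem?_getD, ← h0]
      rfl
    have hrest : rest = l.drop (m + 1) := by
      have h1 := congrArg (List.drop 1) hsuffix
      simpa [List.drop_drop, Nat.add_comm] using h1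
    rw [PySem.List.enumerate_cons]
    simp only [List.foldl_cons]
    have hcast : (m : Int) + 1 = ((m + 1 : Nat) : Int) := by push_cast; ring
    by_cases hdup : 2 ≤ l.count v
    · have hc : seen.getD v 0 + 1 = (((l.take (m + 1)).count v : Nat) : Int) := by
        rw [hseen v hdup, count_take_succ l m v hmlt, hv, if_pos rfl]
        push_cast; ring
      have hstep : pvBStep total (pvPartial l m, seen) ((m : Int), v)
          = (pvPartial l (m + 1), seen.insert v (((l.take (m + 1)).count v : Nat) : Int)) := by
        unfold pvBStep
        rw [if_pos (by rw [htotal]; exact_mod_cast hdup)]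
        simp only [Int.toNat_natCast]
        rw [hc]
        have : v ++ "_" ++ PySem.Int.toStr (((l.take (m + 1)).count v : Nat) : Int) = pvFval l m := by
          rw [pvFval, hv]
        rw [this, pvPartial_set l m (by rwa [hv])]
      rw [hstep, hcast]
      apply ih (m + 1) hrest (by omega)
      intro w hw
      by_cases hwv : w = v
      · subst hwv
        rw [PySem.Dict.getD_insert_self]
      · rw [PySem.Dict.getD_insert_of_ne _ _ _ hwv, hseen w hw,
          count_take_succ l m w hmlt, hv, if_neg (fun h => hwv h.symm)]
        push_cast; ring
    · have hstep : pvBStep total (pvPartial l m, seen) ((m : Int), v) = (pvPartial l m, seen) := by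
        unfold pvBStep
        rw [if_neg (by rw [htotal]; intro h; exact hdup (by exact_mod_cast h))]
      rw [hstep, hcast, ← pvPartial_succ_nondup l m (by rwa [hv])]
      apply ih (m + 1) hrest (by omega)
      intro w hw
      rw [hseen w hw, count_take_succ l m w hmlt, hv,
        if_neg (by intro h; subst h; exact hdup hw)]
      push_cast; ring

theorem pvB_eq_pvRes (l : List String) : list_duplicates_alt l = pvRes l := by
  unfold list_duplicates_alt
  have htotal : ∀ v,
      (l.foldl (fun d v => PySem.Dict.insert d v (PySem.Dict.getD d v 0 + 1)) PySem.Dict.empty).getD v 0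
        = (l.count v : Int) := by
    intro v
    rw [PySem.Dict.getD_foldl_insert_add_one, PySem.Dict.getD_empty]
    simp [List.count]
  have h := pvB_fold l _ htotal l 0 (by simp) (by omega) PySem.Dict.empty
    (by intro v _; simp [PySem.Dict.getD_empty])
  rw [pvPartial_zero] at h
  simpa using h

theorem pre' {l : List String} (hpre : Pre_list_duplicates l) :
    ∀ u val : String, 2 ≤ l.count u → 2 ≤ l.count val → ∀ r : Nat, 1 ≤ r → r ≤ l.count u →
      val ≠ u ++ "_" ++ PySem.Int.toStr (r : Int) := by
  intro u val hu hval r hr1 hr2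
  have hmu : u ∈ l := List.count_pos_iff.mp (by omega)
  have hmv : val ∈ l := List.count_pos_iff.mp (by omega)
  have := hpre u hmu hu val hmv hval (r - 1) (List.mem_range.mpr (by omega))
  have hcast : ((r - 1 : Nat) : Int) + 1 = (r : Int) := by
    have : (1 : Nat) ≤ r := hr1
    push_cast [this]
    ring
  rwa [hcast] at this

-- rank bounds

theorem pvRank_pos (l : List String) (j : Nat) (hj : j < l.length) :
    1 ≤ (l.take (j + 1)).count (l.getD j "") := by
  rw [count_take_succ l j _ hj, if_pos rfl]
  omega

theorem pvRank_le (l : List String) (j : Nat) (v : String) :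
    (l.take (j + 1)).count v ≤ l.count v :=
  (List.take_sublist _ _).count_le _

-- the list with values in S renamed and additionally occurrences of val below a renamed

theorem pvNoCollide {l : List String} (hpre : Pre_list_duplicates l) {u val : String}
    (hu : 2 ≤ l.count u) (hval : 2 ≤ l.count val) (j : Nat) (hj : j < l.length)
    (hju : l.getD j "" = u) : val ≠ pvFval l j := by
  rw [pvFval, hju]
  exact pre' hpre u val hu hval _ (hju ▸ pvRank_pos l j hj) (hju ▸ pvRank_le l j u)

def pvMixedP (l : List String) (S : List String) (val : String) (a : Nat) : List String :=
  (List.range l.length).map (fun j =>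
    if l.getD j "" ∈ S ∨ (l.getD j "" = val ∧ j < a) then pvFval l j else l.getD j "")

theorem pvMixedP_zero (l S : List String) (val : String) :
    pvMixedP l S val 0 = pvMixed l S := by
  simp [pvMixedP, pvMixed]

theorem pvMixedP_length (l S : List String) (val : String) (a : Nat) :
    (pvMixedP l S val a).length = l.length := by
  simp [pvMixedP]

theorem pvMixedP_getD (l S : List String) (val : String) (a : Nat) (j : Nat) (hj : j < l.length) :
    (pvMixedP l S val a).getD j "" =
      (if l.getD j "" ∈ S ∨ (l.getD j "" = val ∧ j < a) then pvFval l j else l.getD j "") := by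
  rw [List.getD_eq_getElem?_getD,
    List.getElem?_eq_getElem (by rwa [pvMixedP_length])]
  simp [pvMixedP]

theorem pvMixed_getD (l S : List String) (j : Nat) (hj : j < l.length) :
    (pvMixed l S).getD j "" = (if l.getD j "" ∈ S then pvFval l j else l.getD j "") := by
  rw [← pvMixedP_zero, pvMixedP_getD l S "" 0 j hj]
  simp

theorem pvDupNum (l S : List String) (val : String) (hpre : Pre_list_duplicates l)
    (hS : ∀ v ∈ S, 2 ≤ l.count v) (hval : 2 ≤ l.count val) (hvS : val ∉ S) :
    ((PySem.List.enumerate (pvMixed l S)).filter (fun p => p.2 == val)).map (fun p => p.1)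
      = (PySem.List.pyRange 0 ((l.length : Int)) 1).filter
          (fun j => PySem.List.pyGetD l j "" == val) := by
  rw [PySem.List.enumerate_eq_map_pyRange _ ""]
  rw [List.filter_map, List.map_map]
  have hlen : PySem.List.len (pvMixed l S) = ((l.length : Int)) := by
    simp [pvMixed]
  rw [hlen]
  have hcong : ∀ j ∈ PySem.List.pyRange 0 ((l.length : Int)) 1,
      ((fun p : Int × String => p.2 == val) ∘ fun j => (j, PySem.List.pyGetD (pvMixed l S) j ""))
        j = (PySem.List.pyGetD l j "" == val) := by
    intro j hj
    rw [PySem.List.mem_pyRange_one] at hj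
    have hj' : j = ((j.toNat : Nat) : Int) := by omega
    have hlt : j.toNat < l.length := by omega
    simp only [Function.comp]
    rw [hj', PySem.List.pyGetD_natCast, PySem.List.pyGetD_natCast]
    rw [pvMixed_getD l S _ hlt]
    by_cases hmem : l.getD j.toNat "" ∈ S
    · rw [if_pos hmem]
      have h1 : (pvFval l j.toNat == val) = false := by
        rw [beq_eq_false_iff_ne]
        exact fun h => pvNoCollide hpre (hS _ hmem) hval j.toNat hlt rfl h.symm
      have h2 : (l.getD j.toNat "" == val) = false := by
        rw [beq_eq_false_iff_ne]
        intro h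
        exact hvS (h ▸ hmem)
      rw [h1, h2]
    · rw [if_neg hmem]
  rw [List.filter_congr hcong]
  exact List.map_id _

theorem pvMixedP_set (l S : List String) (val : String) (a : Nat)
    (hva : l.getD a "" = val) :
    (pvMixedP l S val a).set a (pvFval l a) = pvMixedP l S val (a + 1) := by
  apply List.ext_getElem
  · simp [pvMixedP]
  · intro i h1 h2
    rw [List.getElem_set]
    by_cases hi : a = i
    · subst hi
      rw [if_pos rfl]
      simp only [pvMixedP, List.getElem_map, List.getElem_range]
      rw [if_pos (Or.inr ⟨hva, by omega⟩)]
    · rw [if_neg hi]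
      simp only [pvMixedP, List.getElem_map, List.getElem_range] at *
      by_cases hc : l.getD i "" ∈ S ∨ (l.getD i "" = val ∧ i < a)
      · rw [if_pos hc, if_pos (by rcases hc with h | ⟨h, h'⟩; exact Or.inl h; exact Or.inr ⟨h, by omega⟩)]
      · rw [if_neg hc, if_neg ?_]
        rintro (h | ⟨h, h'⟩)
        · exact hc (Or.inl h)
        · have : i < a := by omega
          exact hc (Or.inr ⟨h, this⟩)

theorem pvMixedP_succ_of_ne (l S : List String) (val : String) (a : Nat)
    (hva : l.getD a "" ≠ val) :
    pvMixedP l S val (a + 1) = pvMixedP l S val a := by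
  apply List.ext_getElem
  · simp [pvMixedP]
  · intro i h1 h2
    simp only [pvMixedP, List.getElem_map, List.getElem_range] at *
    by_cases hc : l.getD i "" ∈ S ∨ (l.getD i "" = val ∧ i < a)
    · rw [if_pos (by rcases hc with h | ⟨h, h'⟩; exact Or.inl h; exact Or.inr ⟨h, by omega⟩), if_pos hc]
    · rw [if_neg ?_, if_neg hc]
      rintro (h | ⟨h, h'⟩)
      · exact hc (Or.inl h)
      · rcases Nat.lt_or_ge i a with h'' | h''
        · exact hc (Or.inr ⟨h, h''⟩)
        · have : i = a := by omega
          exact hva (this ▸ h)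

theorem pvInner (l S : List String) (val : String)
    (hvS : val ∉ S) :
    ∀ (k a : Nat), a + k = l.length →
      ((PySem.List.enumerate
          ((PySem.List.pyRange (a : Int) ((l.length : Int)) 1).filter
            (fun j => PySem.List.pyGetD l j "" == val))
          (((l.take a).count val : Nat) : Int)).foldl pvAInner (pvMixedP l S val a))
        = pvMixedP l S val l.length := by
  intro k
  induction k with
  | zero =>
    intro a ha
    have ha' : a = l.length := by omega
    subst ha'
    rw [PySem.List.pyRange_one_eq_nil (le_refl _)]
    simp
  | succ k ih =>
    intro a ha
    have halt : a < l.length := by omega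
    rw [PySem.List.pyRange_one_cons (by exact_mod_cast halt)]
    rw [List.filter_cons]
    have hget : PySem.List.pyGetD l (a : Int) "" = l.getD a "" := PySem.List.pyGetD_natCast l a ""
    have hcast1 : ((a : Int)) + 1 = (((a + 1 : Nat)) : Int) := by push_cast; ring
    by_cases hva : l.getD a "" = val
    · rw [if_pos (by rw [hget, beq_iff_eq]; exact hva)]
      rw [PySem.List.enumerate_cons, List.foldl_cons]
      have hstep : pvAInner (pvMixedP l S val a)
          ((((l.take a).count val : Nat) : Int), (a : Int)) = pvMixedP l S val (a + 1) := by
        unfold pvAInner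
        simp only [Int.toNat_natCast]
        have hread : PySem.List.pyGetD (pvMixedP l S val a) (a : Int) "" = val := by
          rw [PySem.List.pyGetD_natCast, pvMixedP_getD l S val a a halt]
          rw [if_neg (by rintro (h | ⟨h, h'⟩); exact hvS (hva ▸ h); omega)]
          exact hva
        rw [hread]
        have hcnt : (((l.take a).count val : Nat) : Int) + 1
            = (((l.take (a + 1)).count (l.getD a "") : Nat) : Int) := by
          rw [hva, count_take_succ l a val halt, hva, if_pos rfl]
          push_cast; ring
        rw [hcnt]
        have : val ++ "_" ++ PySem.Int.toStr (((l.take (a + 1)).count (l.getD a "") : Nat) : Int)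
            = pvFval l a := by
          rw [pvFval, hva]
        rw [this]
        exact pvMixedP_set l S val a hva
      rw [hstep, hcast1]
      have hcnt1 : ((((l.take a).count val : Nat) : Int)) + 1
          = (((l.take (a + 1)).count val : Nat) : Int) := by
        rw [count_take_succ l a val halt, hva, if_pos rfl]
        push_cast; ring
      rw [hcnt1]
      exact ih (a + 1) (by omega)
    · rw [if_neg (by rw [hget, beq_iff_eq]; exact hva)]
      rw [hcast1]
      have hcnt1 : (((l.take a).count val : Nat) : Int)
          = (((l.take (a + 1)).count val : Nat) : Int) := by
        rw [count_take_succ l a val halt, if_neg hva]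
        push_cast; ring
      rw [hcnt1, ← pvMixedP_succ_of_ne l S val a hva]
      exact ih (a + 1) (by omega)

theorem pvMixedP_full (l S : List String) (val : String) :
    pvMixedP l S val l.length = pvMixed l (S ++ [val]) := by
  apply List.ext_getElem
  · simp [pvMixedP, pvMixed]
  · intro i h1 h2
    simp only [pvMixedP, pvMixed, List.getElem_map, List.getElem_range] at *
    by_cases hc : l.getD i "" ∈ S ∨ l.getD i "" = val
    · rw [if_pos (by rcases hc with h | h; exact Or.inl h; exact Or.inr ⟨h, by simpa [pvMixedP] using h1⟩),
        if_pos (by rw [List.mem_append, List.mem_singleton]; exact hc)]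
    · rw [if_neg (by rintro (h | ⟨h, _⟩); exact hc (Or.inl h); exact hc (Or.inr h)),
        if_neg (by rw [List.mem_append, List.mem_singleton]; exact hc)]

theorem pvAStep_eq (l S : List String) (val : String) (hpre : Pre_list_duplicates l)
    (hS : ∀ v ∈ S, 2 ≤ l.count v) (hval : 2 ≤ l.count val) (hvS : val ∉ S) :
    pvAStep (pvMixed l S) val = pvMixed l (S ++ [val]) := by
  unfold pvAStep
  dsimp only
  rw [pvDupNum l S val hpre hS hval hvS]
  have h := pvInner l S val hvS l.length 0 (by omega)
  rw [pvMixedP_zero] at h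
  simp only [List.take_zero, List.count_nil, Nat.cast_zero] at h
  rw [← pvMixedP_full l S val]
  exact_mod_cast h

theorem pvOuter (l : List String) (hpre : Pre_list_duplicates l) :
    ∀ (vs S : List String), vs.Nodup → (∀ v ∈ vs, 2 ≤ l.count v ∧ v ∉ S) →
      (∀ v ∈ S, 2 ≤ l.count v) →
      vs.foldl pvAStep (pvMixed l S) = pvMixed l (S ++ vs) := by
  intro vs
  induction vs with
  | nil => intro S _ _ _; simp
  | cons v rest ih =>
    intro S hnd hvs hS
    rw [List.foldl_cons]
    rw [pvAStep_eq l S v hpre hS (hvs v (List.mem_cons_self ..)).1 (hvs v (List.mem_cons_self ..)).2]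
    rw [ih (S ++ [v]) (List.Nodup.of_cons hnd) ?_ ?_]
    · rw [List.append_assoc]
      rfl
    · intro w hw
      refine ⟨(hvs w (List.mem_cons_of_mem _ hw)).1, ?_⟩
      rw [List.mem_append, List.mem_singleton]
      rintro (h | h)
      · exact (hvs w (List.mem_cons_of_mem _ hw)).2 h
      · exact (List.nodup_cons.mp hnd).1 (h ▸ hw)
    · intro u hu
      rw [List.mem_append, List.mem_singleton] at hu
      rcases hu with h | h
      · exact hS u h
      · exact h ▸ (hvs v (List.mem_cons_self ..)).1

theorem pvMixed_eq_pvRes (l T : List String) (h : ∀ v, v ∈ T ↔ 2 ≤ l.count v) :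
    pvMixed l T = pvRes l := by
  apply List.ext_getElem
  · simp [pvMixed, pvRes]
  · intro i h1 h2
    simp only [pvMixed, pvRes, List.getElem_map, List.getElem_range] at *
    by_cases hc : 2 ≤ l.count (l.getD i "")
    · rw [if_pos ((h _).mpr hc), if_pos hc]
    · rw [if_neg (fun hm => hc ((h _).mp hm)), if_neg hc]

theorem pvA_eq_pvRes (l : List String) (hpre : Pre_list_duplicates l) :
    list_duplicates l = pvRes l := by
  unfold list_duplicates
  dsimp only
  have hmem : ∀ v, v ∈ PySem.Set.ofList (pvDupOccs l PySem.Set.empty) ↔ 2 ≤ l.count v := by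
    intro v
    rw [PySem.Set.mem_ofList, mem_pvDupOccs]
    have hemp : PySem.Set.contains PySem.Set.empty v = false := by
      rw [Bool.eq_false_iff]
      intro h
      have := (PySem.Set.contains_iff _ _).1 h
      simp [PySem.Set.empty] at this
    rw [hemp]
    simp
  have h := pvOuter l hpre (PySem.Set.ofList (pvDupOccs l PySem.Set.empty)) []
    (PySem.Set.nodup_ofList _) (fun v hv => ⟨(hmem v).mp hv, by simp⟩) (by simp)
  rw [pvMixed_nil, List.nil_append] at h
  rw [h]
  exact pvMixed_eq_pvRes l _ hmem

-- ===== VERDICT (by name: the statement is the Claim_ definition above) =====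
theorem list_duplicates_spec : Claim_equal_list_duplicates := by
  intro l _ hpre
  unfold Spec_list_duplicates
  rw [pvA_eq_pvRes l hpre, pvB_eq_pvRes l]
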